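-- pv_equiv track=rewrite | github.com/AndySchw/Raspi-GPS | scripts/test_final_working.py | create_stripes_pattern
-- ===== SOURCE A (Python) =====
-- def create_stripes_pattern(width, height):
--     """
--     Vertikale Streifen:
--     - Jedes 2. Byte schwarz/weiß
--     """
--     bytes_per_line = width // 8
--     black_data = []
--     red_data = []
--
--     for y in range(height):
--         for x_byte in range(bytes_per_line):
--             if x_byte % 2 == 0:
--                 black_data.append(0x00)  # Schwarz
--             else:
--                 black_data.append(0xFF)  # Weiß
--             red_data.append(0xFF)  # Alles transparent
--
--     return black_data, red_data
-- ===== SOURCE B (Python) =====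
-- def create_stripes_pattern(width, height):
--     """
--     Vertikale Streifen:
--     - Jedes 2. Byte schwarz/weiss
--     """
--     if height <= 0:
--         return [], []
--     bytes_per_line = width // 8
--     black_line = [0x00 if b % 2 == 0 else 0xFF for b in range(bytes_per_line)]
--     black_data = black_line * height
--     red_data = [0xFF] * (len(black_line) * height)
--     return black_data, red_data
-- ===== Notes on version B (the rewrite author's own statement) =====
-- stated objective: faster
-- what changed: Replaces the nested per-row byte loops with computing one line's pattern once and replicating it height times (black) and a single replicated constant list (red).
import Mathlib
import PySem

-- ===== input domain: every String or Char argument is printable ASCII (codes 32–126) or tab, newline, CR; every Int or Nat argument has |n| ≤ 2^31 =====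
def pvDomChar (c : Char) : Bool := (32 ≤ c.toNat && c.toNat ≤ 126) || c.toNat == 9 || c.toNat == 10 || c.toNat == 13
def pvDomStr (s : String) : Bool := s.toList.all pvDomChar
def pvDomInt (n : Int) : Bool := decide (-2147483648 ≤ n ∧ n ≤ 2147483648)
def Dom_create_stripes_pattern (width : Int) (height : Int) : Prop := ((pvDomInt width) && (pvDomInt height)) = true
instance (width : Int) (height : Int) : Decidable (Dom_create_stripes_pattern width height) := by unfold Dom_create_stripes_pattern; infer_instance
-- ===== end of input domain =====

-- B computes one line's stripe bytes once and replicates it, instead of A's nested per-row/per-byte loops (constant-factor speedup; return values identical).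

-- ===== PORT A =====
-- literal transliteration: nested for-loops over range(height) / range(bytes_per_line),
-- appending to the two accumulator lists
def create_stripes_pattern (width : Int) (height : Int) : List Int × List Int :=
  let bytes_per_line := PySem.Int.floordiv width 8
  (PySem.List.pyRange 0 height 1).foldl (fun acc _y =>
    (PySem.List.pyRange 0 bytes_per_line 1).foldl (fun acc2 x_byte =>
      (acc2.1 ++ [if PySem.Int.mod x_byte 2 == 0 then (0x00 : Int) else (0xFF : Int)],
       acc2.2 ++ [(0xFF : Int)])) acc)
    ([], [])

-- ===== PORT B =====
-- literal transliteration of Source B: one comprehension for a single line, then list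
-- replication (Python's `list * n`, empty for n ≤ 0) for both outputs
def create_stripes_pattern_alt (width : Int) (height : Int) : List Int × List Int :=
  if height ≤ 0 then ([], []) else
  let bytes_per_line := PySem.Int.floordiv width 8
  let black_line := (PySem.List.pyRange 0 bytes_per_line 1).map
    (fun b => if PySem.Int.mod b 2 == 0 then (0x00 : Int) else (0xFF : Int))
  let black_data := (List.replicate height.toNat black_line).flatten
  let red_data := List.replicate ((black_line.length : Int) * height).toNat (0xFF : Int)
  (black_data, red_data)

-- ===== PRECONDITION & SPEC =====
def Spec_create_stripes_pattern (width : Int) (height : Int) (out : List Int × List Int) : Prop := out = create_stripes_pattern_alt width height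
instance (width : Int) (height : Int) (out : List Int × List Int) : Decidable (Spec_create_stripes_pattern width height out) := by unfold Spec_create_stripes_pattern; infer_instance

-- ===== CLAIM (what is proved, stated in full; the proofs are below) =====
def Claim_equal_create_stripes_pattern : Prop := ∀ (width : Int) (height : Int), Dom_create_stripes_pattern width height → Spec_create_stripes_pattern width height (create_stripes_pattern width height)

-- ===== LEMMAS AND PROOFS =====

-- A's inner loop: one row appends the mapped line to black and a constant row to red
theorem pv_inner_fold (l : List Int) (acc : List Int × List Int) :
    l.foldl (fun acc2 x =>
      (acc2.1 ++ [if PySem.Int.mod x 2 == 0 then (0x00 : Int) else (0xFF : Int)],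
       acc2.2 ++ [(0xFF : Int)])) acc
    = (acc.1 ++ l.map (fun x => if PySem.Int.mod x 2 == 0 then (0x00 : Int) else (0xFF : Int)),
       acc.2 ++ List.replicate l.length (0xFF : Int)) := by
  induction l generalizing acc with
  | nil => simp
  | cons a t ih => rw [List.foldl_cons, ih]; simp [List.replicate_succ]

-- A's outer loop: folding a constant row-append over any list concatenates that many copies
theorem pv_outer_fold (l : List Int) (L R : List Int) (acc : List Int × List Int) :
    l.foldl (fun a (_ : Int) => (a.1 ++ L, a.2 ++ R)) acc
    = (acc.1 ++ (List.replicate l.length L).flatten,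
       acc.2 ++ (List.replicate l.length R).flatten) := by
  induction l generalizing acc with
  | nil => simp
  | cons a t ih => simp [List.foldl_cons, ih, List.replicate_succ]

theorem pv_flatten_rep_rep {α : Type} (n k : Nat) (c : α) :
    (List.replicate n (List.replicate k c)).flatten = List.replicate (n * k) c := by
  induction n with
  | zero => simp
  | succ m ih =>
    rw [List.replicate_succ, List.flatten_cons, ih, Nat.succ_mul, Nat.add_comm,
      List.replicate_add]

theorem pv_toNat_mul (k : Nat) (h : Int) : ((k : Int) * h).toNat = h.toNat * k := by
  rcases Int.lt_or_le h 0 with hh | hh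
  · rw [Int.toNat_of_nonpos (by exact mul_nonpos_of_nonneg_of_nonpos (Int.natCast_nonneg k) hh.le),
        Int.toNat_of_nonpos hh.le, Nat.zero_mul]
  · obtain ⟨m, rfl⟩ := Int.eq_ofNat_of_zero_le hh
    rw [← Int.natCast_mul, Int.toNat_natCast, Int.toNat_natCast, Nat.mul_comm]

-- ===== VERDICT (by name: the statement is the Claim_ definition above) =====
theorem create_stripes_pattern_spec : Claim_equal_create_stripes_pattern := by
  intro width height _
  unfold Spec_create_stripes_pattern create_stripes_pattern create_stripes_pattern_alt
  by_cases hh : height ≤ 0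
  · rw [if_pos hh, PySem.List.pyRange_one_eq_nil hh, List.foldl_nil]
  rw [if_neg hh]
  simp only [pv_inner_fold]
  rw [pv_outer_fold]
  simp only [PySem.List.length_pyRange_one, Int.sub_zero, List.nil_append,
    List.length_map, pv_flatten_rep_rep, pv_toNat_mul]
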